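-- pv_equiv track=rewrite | github.com/jlanej/kmer_denovo_filter | scripts/build_mini_ref.py | _cluster_intervals
-- ===== SOURCE A (Python) =====
-- def _cluster_intervals(positions, max_gap=1000):
--     """Cluster sorted positions into contiguous intervals.
--
--     Adjacent positions separated by more than *max_gap* bases start a
--     new interval.
--
--     Returns list of (start, end) tuples (0-based, half-open).
--     """
--     if not positions:
--         return []
--
--     sorted_pos = sorted(positions)
--     intervals = []
--     start = sorted_pos[0]
--     prev = sorted_pos[0]
--
--     for pos in sorted_pos[1:]:
--         if pos - prev > max_gap:
--             intervals.append((start, prev + 1))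
--             start = pos
--         prev = pos
--
--     intervals.append((start, prev + 1))
--     return intervals
-- ===== SOURCE B (Python) =====
-- def _cluster_intervals(positions, max_gap=1000):
--     """Cluster sorted positions into contiguous intervals (run-splitting form)."""
--
--     def split_run(prev, xs):
--         # follow the run ending at prev through xs; return (last element of run, remainder)
--         for k, x in enumerate(xs):
--             if x - prev > max_gap:
--                 return prev, xs[k:]
--             prev = x
--         return prev, []
--
--     out = []
--     rest = sorted(positions)
--     while rest:
--         head, tail = rest[0], rest[1:]
--         last, rest = split_run(head, tail)
--         out.append((head, last + 1))
--     return out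
-- ===== Notes on version B (the rewrite author's own statement) =====
-- stated objective: alternative
-- what changed: Replaced the single stateful start/prev accumulator scan with a recursive run-splitting decomposition: a helper splits off the maximal gap-connected run, each run maps to (first, last+1), and the loop repeats on the remainder.
import Mathlib
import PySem

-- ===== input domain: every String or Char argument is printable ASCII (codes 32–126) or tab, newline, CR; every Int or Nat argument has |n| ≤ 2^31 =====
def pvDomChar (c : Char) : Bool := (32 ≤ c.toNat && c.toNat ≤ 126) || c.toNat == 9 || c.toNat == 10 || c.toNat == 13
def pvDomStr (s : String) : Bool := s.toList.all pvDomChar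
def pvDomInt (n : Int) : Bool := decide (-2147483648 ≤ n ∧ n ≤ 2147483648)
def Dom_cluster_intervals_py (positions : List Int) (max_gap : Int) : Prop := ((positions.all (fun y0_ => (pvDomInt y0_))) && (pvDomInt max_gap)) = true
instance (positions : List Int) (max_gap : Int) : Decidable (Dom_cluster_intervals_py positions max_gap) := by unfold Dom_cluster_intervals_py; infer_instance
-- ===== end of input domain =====

-- B replaces A's stateful start/prev accumulator scan by a recursive run-splitting
-- decomposition (split off a maximal gap-connected run, emit (first, last+1), recurse);
-- objective: alternative (same cost, different structure).

-- ===== PORT A =====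
-- one step of A's for-loop: state = (intervals, start, prev)
def pvAStep (g : Int) (st : List (Int × Int) × Int × Int) (pos : Int) :
    List (Int × Int) × Int × Int :=
  let (intervals, start, prev) := st
  if pos - prev > g then (intervals ++ [(start, prev + 1)], pos, pos)
  else (intervals, start, pos)   -- prev := pos happens in both branches

def cluster_intervals_py (positions : List Int) (max_gap : Int) : List (Int × Int) :=
  if positions = [] then []
  else
    let sorted_pos := PySem.List.sorted positions (fun x => x) false
    match sorted_pos with
    | [] => []   -- unreachable: sorted of a nonempty list is nonempty
    | s0 :: rest =>
      let fin := rest.foldl (pvAStep max_gap) ([], s0, s0)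
      fin.1 ++ [(fin.2.1, fin.2.2 + 1)]

-- ===== PORT B =====
-- split_run prev xs: follow the run ending at prev through xs;
-- returns (last element of the run, remainder after the first over-gap break)
def pvSplitRun (g : Int) (prev : Int) (xs : List Int) : Int × List Int :=
  match xs with
  | [] => (prev, [])
  | x :: rest =>
    if x - prev > g then (prev, x :: rest)
    else pvSplitRun g x rest

theorem pvSplitRun_snd_length (g prev : Int) (xs : List Int) :
    (pvSplitRun g prev xs).2.length ≤ xs.length := by
  induction xs generalizing prev with
  | nil => simp [pvSplitRun]
  | cons x rest ih =>
    simp only [pvSplitRun]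
    split
    · simp
    · exact Nat.le_succ_of_le (ih x)

def pvGoB (g : Int) : List Int → List (Int × Int)
  | [] => []
  | x :: rest =>
    let p := pvSplitRun g x rest
    (x, p.1 + 1) :: pvGoB g p.2
termination_by xs => xs.length
decreasing_by
  exact Nat.lt_succ_of_le (pvSplitRun_snd_length g x rest)

def cluster_intervals_py_alt (positions : List Int) (max_gap : Int) : List (Int × Int) :=
  pvGoB max_gap (PySem.List.sorted positions (fun x => x) false)

-- ===== PRECONDITION & SPEC =====
def Spec_cluster_intervals_py (positions : List Int) (max_gap : Int) (out : List (Int × Int)) : Prop := out = cluster_intervals_py_alt positions max_gap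
instance (positions : List Int) (max_gap : Int) (out : List (Int × Int)) : Decidable (Spec_cluster_intervals_py positions max_gap out) := by unfold Spec_cluster_intervals_py; infer_instance

-- ===== CLAIM (what is proved, stated in full; the proofs are below) =====
def Claim_equal_cluster_intervals_py : Prop := ∀ (positions : List Int) (max_gap : Int), Dom_cluster_intervals_py positions max_gap → Spec_cluster_intervals_py positions max_gap (cluster_intervals_py positions max_gap)

-- ===== LEMMAS AND PROOFS =====

-- B's behaviour mid-run: current run started at `start`, its last seen element is `prev`
def pvContB (g : Int) (start prev : Int) (xs : List Int) : List (Int × Int) :=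
  let p := pvSplitRun g prev xs
  (start, p.1 + 1) :: pvGoB g p.2

theorem pvGoB_cons (g x : Int) (rest : List Int) :
    pvGoB g (x :: rest) = pvContB g x x rest := by
  rw [pvGoB, pvContB]

theorem pv_main (g : Int) (xs : List Int) :
    ∀ (start prev : Int) (acc : List (Int × Int)),
    (xs.foldl (pvAStep g) (acc, start, prev)).1
        ++ [((xs.foldl (pvAStep g) (acc, start, prev)).2.1,
             (xs.foldl (pvAStep g) (acc, start, prev)).2.2 + 1)]
      = acc ++ pvContB g start prev xs := by
  induction xs with
  | nil => intro start prev acc; simp [pvContB, pvSplitRun, pvGoB]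
  | cons x rest ih =>
    intro start prev acc
    by_cases h : x - prev > g
    · simp only [List.foldl_cons, pvAStep, if_pos h]
      rw [ih x x (acc ++ [(start, prev + 1)])]
      rw [← pvGoB_cons]
      conv_rhs => rw [pvContB]
      simp only [pvSplitRun, if_pos h]
      simp
    · simp only [List.foldl_cons, pvAStep, if_neg h]
      rw [ih start x acc]
      conv_rhs => rw [pvContB]
      simp only [pvSplitRun, if_neg h]
      rw [pvContB]

-- ===== VERDICT (by name: the statement is the Claim_ definition above) =====
theorem cluster_intervals_py_spec : Claim_equal_cluster_intervals_py := by
  intro positions max_gap _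
  unfold Spec_cluster_intervals_py cluster_intervals_py cluster_intervals_py_alt
  by_cases hp : positions = []
  · simp [hp, PySem.List.sorted, pvGoB]
  · simp only [if_neg hp]
    rcases hs : PySem.List.sorted positions (fun x => x) false with _ | ⟨s0, rest⟩
    · have := PySem.List.sorted_perm (xs := positions) (key := fun x => x) (rev := false)
      rw [hs] at this
      exact absurd this.symm.eq_nil hp
    · simpa [pvGoB_cons] using pv_main max_gap rest s0 s0 []
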